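-- pv_equiv track=rewrite | github.com/masakiaota/kyoupuro | practice/D_ABC/abc095_d/abc095_d.py | solve_max_a_plas_b
-- ===== SOURCE A (Python) =====
-- from itertools import product, permutations, combinations, accumulate
--
-- def solve_max_a_plas_b(A: list, B: list):
--     '''max_{i<j}(a_i + b_j)をO(n)で解く (古いpypyだとfuncが未実装かも)'''
--     assert len(A) == len(B)
--     A_accum = list(accumulate(A, func=max))
--     B_accum = list(accumulate(reversed(B), func=max))[::-1]
--     ret = 0
--     for i in range(len(A_accum) - 1):
--         ret = max(A_accum[i] + B_accum[i + 1], ret)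
--     return ret
-- ===== SOURCE B (Python) =====
-- def solve_max_a_plas_b(A: list, B: list):
--     '''max_{i<j}(a_i + b_j): single pass keeping a running prefix max of A.'''
--     assert len(A) == len(B)
--     ret = 0
--     best_a = None
--     for a, b in zip(A, B):
--         if best_a is None:
--             best_a = a
--         else:
--             ret = max(ret, best_a + b)
--             best_a = max(best_a, a)
--     return ret
-- ===== Notes on version B (the rewrite author's own statement) =====
-- stated objective: simpler
-- what changed: B replaces the two accumulate-built prefix/suffix max arrays and the index loop with a single zip pass that maintains a running prefix maximum of A and the running answer.
import Mathlib
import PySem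

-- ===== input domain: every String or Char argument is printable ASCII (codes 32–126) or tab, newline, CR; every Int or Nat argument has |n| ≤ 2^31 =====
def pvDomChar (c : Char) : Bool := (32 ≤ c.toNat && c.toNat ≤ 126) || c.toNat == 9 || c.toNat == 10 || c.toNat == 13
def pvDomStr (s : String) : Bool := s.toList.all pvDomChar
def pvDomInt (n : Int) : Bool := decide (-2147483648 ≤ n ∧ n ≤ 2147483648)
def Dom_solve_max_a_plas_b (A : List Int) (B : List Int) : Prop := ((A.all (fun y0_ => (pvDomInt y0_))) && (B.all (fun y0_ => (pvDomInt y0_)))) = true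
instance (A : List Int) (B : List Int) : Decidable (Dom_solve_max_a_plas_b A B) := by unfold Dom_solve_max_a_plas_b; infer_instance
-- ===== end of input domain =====

-- B replaces the two accumulate-built prefix/suffix max arrays and the index loop with a
-- single zip pass keeping a running prefix maximum of A (same O(n) time, O(1) extra space).

-- ===== PORT A =====
-- itertools.accumulate(l, func=max): running maxima.  accumulate([]) = [],
-- accumulate(x::xs) starts from x; pvAccGo carries the current running max.
def pvAccGo (cur : Int) : List Int → List Int
  | [] => [cur]
  | x :: xs => cur :: pvAccGo (max cur x) xs

def pvAccMax : List Int → List Int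
  | [] => []
  | x :: xs => pvAccGo x xs

def solve_max_a_plas_b (A : List Int) (B : List Int) : Int :=
  -- assert len(A) == len(B): Pre_ excludes the AssertionError inputs
  let A_accum := pvAccMax A
  -- list(accumulate(reversed(B), func=max))[::-1]
  let B_accum := ((PySem.List.slice? (pvAccMax B.reverse) none none (-1)).getD [])
  (PySem.List.pyRange 0 ((A_accum.length : Int) - 1) 1).foldl
    (fun ret i =>
      max (PySem.List.pyGetD A_accum i 0 + PySem.List.pyGetD B_accum (i + 1) 0) ret) 0

-- ===== PORT B =====
def solve_max_a_plas_b_alt (A : List Int) (B : List Int) : Int :=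
  -- assert len(A) == len(B): Pre_ excludes the AssertionError inputs
  ((A.zip B).foldl
    (fun s p =>
      match s.2 with
      | none => (s.1, some p.1)
      | some best => (max s.1 (best + p.2), some (max best p.1)))
    (0, (none : Option Int))).1

-- ===== PRECONDITION & SPEC =====
-- Pre_ excludes exactly the inputs where A's `assert len(A) == len(B)` raises AssertionError.
def Pre_solve_max_a_plas_b (A : List Int) (B : List Int) : Prop := A.length = B.length
instance (A : List Int) (B : List Int) : Decidable (Pre_solve_max_a_plas_b A B) := by
  unfold Pre_solve_max_a_plas_b; infer_instance

def pvWitness_solve_max_a_plas_b : List Int × List Int := ([1, 2], [3, 4])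

def Spec_solve_max_a_plas_b (A : List Int) (B : List Int) (out : Int) : Prop := out = solve_max_a_plas_b_alt A B
instance (A : List Int) (B : List Int) (out : Int) : Decidable (Spec_solve_max_a_plas_b A B out) := by
  unfold Spec_solve_max_a_plas_b; infer_instance

-- ===== CLAIM (what is proved, stated in full; the proofs are below) =====
def Claim_equal_solve_max_a_plas_b : Prop := ∀ (A : List Int) (B : List Int), Dom_solve_max_a_plas_b A B → Pre_solve_max_a_plas_b A B → Spec_solve_max_a_plas_b A B (solve_max_a_plas_b A B)

-- ===== LEMMAS AND PROOFS =====

-- suffix maxima: pvSufMax l !! i = max of l.drop i (head form proved in pvSufMax_cons)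
def pvSufMax : List Int → List Int
  | [] => []
  | b :: bs => (match pvSufMax bs with | [] => b | m :: _ => max b m) :: pvSufMax bs

-- the state of B's loop once best_a is set: list of remaining (a, b) pairs, ret, best_a
def pvS : List (Int × Int) → Int → Int → Int
  | [], ret, _ => ret
  | p :: ps, ret, best => pvS ps (max ret (best + p.2)) (max best p.1)

theorem pvAccGo_length (l : List Int) : ∀ cur, (pvAccGo cur l).length = l.length + 1 := by
  induction l with
  | nil => intro cur; simp [pvAccGo]
  | cons x xs ih => intro cur; simp [pvAccGo, ih]

theorem pvSufMax_length (l : List Int) : (pvSufMax l).length = l.length := by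
  induction l with
  | nil => simp [pvSufMax]
  | cons b bs ih => simp [pvSufMax, ih]

theorem foldl_max_pull (l : List Int) : ∀ b c, l.foldl max (max b c) = max b (l.foldl max c) := by
  induction l with
  | nil => intro b c; simp
  | cons x xs ih =>
    intro b c
    simp only [List.foldl_cons, max_assoc]
    exact ih b (max c x)

theorem foldl_max_reverse (l : List Int) : ∀ b, l.reverse.foldl max b = l.foldl max b := by
  induction l with
  | nil => intro b; simp
  | cons x xs ih =>
    intro b
    simp only [List.reverse_cons, List.foldl_append, List.foldl_cons, List.foldl_nil, ih,
      List.foldl_cons]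
    rw [max_comm b x, foldl_max_pull]
    exact max_comm _ _

theorem pvAccGo_append (l : List Int) : ∀ cur y,
    pvAccGo cur (l ++ [y]) = pvAccGo cur l ++ [max (l.foldl max cur) y] := by
  induction l with
  | nil => intro cur y; simp [pvAccGo]
  | cons x xs ih => intro cur y; simp [pvAccGo, ih]

theorem pvSufMax_cons (bs : List Int) : ∀ b, pvSufMax (b :: bs) = bs.foldl max b :: pvSufMax bs := by
  induction bs with
  | nil => intro b; simp [pvSufMax]
  | cons c t ih =>
    intro b
    rw [show pvSufMax (b :: c :: t)
        = (match pvSufMax (c :: t) with | [] => b | m :: _ => max b m) :: pvSufMax (c :: t)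
        from rfl, ih c]
    simp only [List.foldl_cons]
    rw [foldl_max_pull t b c]

theorem pvAccMax_reverse (bs : List Int) : (pvAccMax bs.reverse).reverse = pvSufMax bs := by
  induction bs with
  | nil => simp [pvAccMax, pvSufMax]
  | cons b bs ih =>
    rw [pvSufMax_cons, List.reverse_cons]
    cases hb : bs.reverse with
    | nil =>
      have : bs = [] := by simpa using congrArg List.reverse hb
      subst this
      simp [pvAccMax, pvAccGo, pvSufMax]
    | cons h tl =>
      rw [show pvAccMax (h :: tl ++ [b]) = pvAccGo h (tl ++ [b]) from rfl,
        pvAccGo_append tl h b, List.reverse_append, List.reverse_singleton]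
      rw [hb] at ih
      have hrev : (pvAccGo h tl).reverse = pvSufMax bs := by simpa [pvAccMax] using ih
      have hfold : max (tl.foldl max h) b = bs.foldl max b := by
        rw [show bs.foldl max b = bs.reverse.foldl max b from (foldl_max_reverse bs b).symm, hb]
        simp only [List.foldl_cons]
        rw [foldl_max_pull tl b h]
        exact max_comm _ _
      simp [hrev, hfold]

theorem pvS_max (l : List (Int × Int)) : ∀ a r best, pvS l (max a r) best = max a (pvS l r best) := by
  induction l with
  | nil => intro a r best; simp [pvS]
  | cons p ps ih =>
    intro a r best
    simp only [pvS, max_assoc]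
    exact ih a (max r (best + p.2)) (max best p.1)

theorem pvS_ge_ret (l : List (Int × Int)) : ∀ r best, r ≤ pvS l r best := by
  induction l with
  | nil => intro r best; simp [pvS]
  | cons p ps ih =>
    intro r best
    exact le_trans (le_max_left _ _) (ih _ _)

theorem pvS_lb (l : List (Int × Int)) : ∀ r best p, p ∈ l → best + p.2 ≤ pvS l r best := by
  induction l with
  | nil => intro r best p hp; simp at hp
  | cons q ps ih =>
    intro r best p hp
    rcases List.mem_cons.mp hp with h | h
    · subst h
      exact le_trans (le_max_right r (best + p.2)) (pvS_ge_ret ps _ _)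
    · calc best + p.2 ≤ max best q.1 + p.2 := by
            have := le_max_left best q.1; omega
        _ ≤ pvS ps (max r (best + q.2)) (max best q.1) := ih _ _ p h

-- key invariant: folding A's (prefix-max, suffix-max) zip equals B's single pass
theorem pvKey (as : List Int) : ∀ (bs : List Int) (ret best : Int), as.length = bs.length →
    ((pvAccGo best as).zip (pvSufMax bs)).foldl (fun r p => max (p.1 + p.2) r) ret
      = pvS (as.zip bs) ret best := by
  induction as with
  | nil =>
    intro bs ret best hlen
    have : bs = [] := by simpa using hlen.symm
    subst this
    simp [pvAccGo, pvSufMax, pvS]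
  | cons a as ih =>
    intro bs ret best hlen
    cases bs with
    | nil => simp at hlen
    | cons b bs =>
      have hlen' : as.length = bs.length := by simpa using hlen
      rw [pvSufMax_cons]
      simp only [pvAccGo, List.zip_cons_cons, List.foldl_cons, pvS]
      rw [ih bs _ (max best a) hlen']
      have hbm : b ≤ List.foldl max b bs := (PySem.List.le_foldl_max bs b).1
      rw [max_comm ret (best + b)]
      rw [pvS_max, pvS_max]
      rcases PySem.List.foldl_max_mem bs b with h | h
      · rw [h]
      · -- the max of b :: bs lies in bs: it is dominated by the pvS value
        have hsnd : (as.zip bs).map Prod.snd = bs := List.map_snd_zip (le_of_eq hlen'.symm)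
        have hmem : List.foldl max b bs ∈ (as.zip bs).map Prod.snd := by rw [hsnd]; exact h
        rcases List.mem_map.mp hmem with ⟨p, hp, hp2⟩
        have hx := pvS_lb (as.zip bs) ret (max best a) p hp
        rw [hp2] at hx
        have hba : best ≤ max best a := le_max_left best a
        have h1 : best + List.foldl max b bs ≤ pvS (as.zip bs) ret (max best a) := by omega
        rw [max_eq_right (le_trans (by omega) h1 :
              best + b ≤ pvS (as.zip bs) ret (max best a)),
            max_eq_right h1]

-- B's option-state fold, once best_a is set, is pvS
theorem alt_fold (l : List (Int × Int)) : ∀ ret best,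
    (l.foldl
      (fun s p =>
        match s.2 with
        | none => (s.1, some p.1)
        | some best => (max s.1 (best + p.2), some (max best p.1)))
      (ret, some best)).1 = pvS l ret best := by
  induction l with
  | nil => intro ret best; simp [pvS]
  | cons p ps ih => intro ret best; simp only [List.foldl_cons, pvS]; exact ih _ _

theorem alt_cons (a b : Int) (as bs : List Int) :
    solve_max_a_plas_b_alt (a :: as) (b :: bs) = pvS (as.zip bs) 0 a := by
  simp only [solve_max_a_plas_b_alt, List.zip_cons_cons, List.foldl_cons]
  exact alt_fold (as.zip bs) 0 a

-- ===== VERDICT (by name: the statement is the Claim_ definition above) =====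
theorem solve_max_a_plas_b_spec : Claim_equal_solve_max_a_plas_b := by
  intro A B _ hpre
  unfold Spec_solve_max_a_plas_b
  unfold Pre_solve_max_a_plas_b at hpre
  cases A with
  | nil =>
    have : B = [] := by simpa using hpre.symm
    subst this
    simp [solve_max_a_plas_b, solve_max_a_plas_b_alt, pvAccMax, PySem.List.pyRange]
  | cons a as =>
    cases B with
    | nil => simp at hpre
    | cons b bs =>
      have hlen : as.length = bs.length := by simpa using hpre
      rw [alt_cons]
      unfold solve_max_a_plas_b
      simp only [PySem.List.slice?_none_none_neg_one, Option.getD_some]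
      rw [pvAccMax_reverse (b :: bs), pvSufMax_cons,
        show pvAccMax (a :: as) = pvAccGo a as from rfl]
      set accA := pvAccGo a as with hacc
      set sufB := pvSufMax bs with hsuf
      have hlenA : accA.length = as.length + 1 := pvAccGo_length as a
      have hlenS : sufB.length = bs.length := pvSufMax_length bs
      have hcs : (accA.zip sufB).length = as.length := by
        simp [List.length_zip, hlenA, hlenS, hlen]
      have hrange : ((accA.length : Int) - 1) = ((accA.zip sufB).length : Int) := by
        rw [hlenA, hcs]; push_cast; ring
      rw [hrange]
      have hcongr :
          (PySem.List.pyRange 0 ((accA.zip sufB).length : Int) 1).foldl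
            (fun ret i =>
              max (PySem.List.pyGetD accA i 0 +
                   PySem.List.pyGetD (List.foldl max b bs :: sufB) (i + 1) 0) ret) 0
          = (PySem.List.pyRange 0 ((accA.zip sufB).length : Int) 1).foldl
            (fun ret i =>
              max ((PySem.List.pyGetD (accA.zip sufB) i (0, 0)).1 +
                   (PySem.List.pyGetD (accA.zip sufB) i (0, 0)).2) ret) 0 := by
        apply PySem.List.foldl_congr_mem
        intro acc i hi
        rcases (PySem.List.mem_pyRange_one).mp hi with ⟨h0, h1⟩
        have hiN : i.toNat < (accA.zip sufB).length := by omega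
        have hzip : PySem.List.pyGetD (accA.zip sufB) i (0, 0) = (accA.zip sufB)[i.toNat] :=
          PySem.List.pyGetD_eq_getElem _ _ h0 (by exact_mod_cast h1)
        have hiA : i.toNat < accA.length := by omega
        have hiS : i.toNat < sufB.length := by
          rw [hlenS, ← hlen]; omega
        have hA : PySem.List.pyGetD accA i 0 = accA[i.toNat] :=
          PySem.List.pyGetD_eq_getElem _ _ h0 (by omega)
        have hB := PySem.List.pyGetD_eq_getElem (List.foldl max b bs :: sufB) (i := i + 1) 0
          (by omega) (by simp only [List.length_cons]; push_cast; omega)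
        have hidx : (i + 1).toNat = i.toNat + 1 := by omega
        rw [hzip, hA, hB]
        simp [hidx, List.getElem_zip, List.getElem_cons_succ]
      rw [hcongr]
      have := PySem.List.foldl_pyRange_zero_pyGetD' (accA.zip sufB) ((0 : Int), (0 : Int))
        (fun r (p : Int × Int) => max (p.1 + p.2) r) 0
      rw [this]
      exact pvKey as bs 0 a hlen
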